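-- pv_equiv track=rewrite | github.com/SontuCoder/Practices-Qusetion-DSA | ARRAY/2. Sliding Window/2. First Negetive int print.py | neg_int
-- ===== SOURCE A (Python) =====
-- def neg_int(arr,k):
--     i=0
--     li=[]
--     while(i<=len(arr)-k):
--         a = list(filter(lambda x : x <0, arr[i:i+k]))
--         li.append(max(a) if len(a)>0 else 0)
--         i+=1
--     return li
-- ===== SOURCE B (Python) =====
-- from collections import deque
--
-- def neg_int(arr, k):
--     dq = deque()          # indices of negative elements, values strictly decreasing front to back
--     res = []
--     for j, x in enumerate(arr):
--         if x < 0: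
--             while dq and arr[dq[-1]] <= x:
--                 dq.pop()
--             dq.append(j)
--         if j >= k - 1:
--             while dq and dq[0] <= j - k:
--                 dq.popleft()
--             res.append(arr[dq[0]] if dq else 0)
--     return res
-- ===== Notes on version B (the rewrite author's own statement) =====
-- stated objective: faster
-- what changed: Replaces the per-window slice+filter+max rescan (O(n*k)) with a single left-to-right pass maintaining a monotonic deque of indices of negative elements, so each window's answer is read off the deque front in amortised O(1).
-- outside the precondition, e.g. on neg_int([1, -2], 0): A returns [0, 0, 0], B returns [0, 0]; on neg_int([-1, -2, -3], -1): A returns [-1, 0, 0, 0, 0], B returns [0, 0, 0]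
import Mathlib
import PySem

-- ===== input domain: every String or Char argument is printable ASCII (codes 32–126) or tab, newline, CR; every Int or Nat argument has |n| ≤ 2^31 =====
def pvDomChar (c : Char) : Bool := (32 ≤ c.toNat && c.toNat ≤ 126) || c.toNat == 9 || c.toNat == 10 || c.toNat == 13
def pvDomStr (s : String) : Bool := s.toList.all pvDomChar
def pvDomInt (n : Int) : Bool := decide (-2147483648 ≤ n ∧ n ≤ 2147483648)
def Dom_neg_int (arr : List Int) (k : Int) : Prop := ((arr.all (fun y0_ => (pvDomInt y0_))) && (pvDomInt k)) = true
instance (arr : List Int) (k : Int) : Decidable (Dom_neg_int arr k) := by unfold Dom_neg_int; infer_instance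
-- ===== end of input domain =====

-- B replaces A's per-window slice+filter+max rescan with a one-pass monotonic
-- deque of indices of negative elements (objective: faster, O(n) vs O(n*k)).

-- ===== PORT A =====
-- while i <= len(arr)-k: a = filter(neg, arr[i:i+k]); li.append(max(a) if a else 0)
def neg_int (arr : List Int) (k : Int) : List Int :=
  (PySem.List.pyRange 0 ((arr.length : Int) - k + 1) 1).foldl
    (fun li i =>
      let a := (PySem.List.slice arr (some i) (some (i + k))).filter (fun x => decide (x < 0))
      li ++ [if a.length > 0 then (PySem.List.max? a (fun x => x)).getD 0 else 0]) []

-- ===== PORT B =====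
-- The deque of Source B is a List Int with head = front; dq.pop() from the back is
-- dropWhile on the reverse, dq.popleft() from the front is dropWhile.
-- arr[idx] is PySem.List.pyGetD arr idx 0: every index stored in dq is in range,
-- so this is exact.
def neg_int_alt (arr : List Int) (k : Int) : List Int :=
  ((PySem.List.enumerate arr 0).foldl
    (fun (st : List Int × List Int) (jx : Int × Int) =>
      let dq0 := st.1
      let j := jx.1
      let x := jx.2
      let dq1 := if x < 0 then
          (dq0.reverse.dropWhile (fun i => PySem.List.pyGetD arr i 0 ≤ x)).reverse ++ [j]
        else dq0
      if j ≥ k - 1 then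
        let dq2 := dq1.dropWhile (fun i => i ≤ j - k)
        (dq2, st.2 ++ [match dq2 with
                       | [] => 0
                       | i :: _ => PySem.List.pyGetD arr i 0])
      else (dq1, st.2))
    ([], [])).2

-- ===== PRECONDITION & SPEC =====
-- Pre_ restricts to the natural domain of a window size: k ≥ 1. For k ≤ 0 the
-- window size is not meaningful and A's values there (extra empty windows for
-- k = 0, Python negative-slice wraparound windows for k < 0) are accidental.
def Pre_neg_int (arr : List Int) (k : Int) : Prop := 1 ≤ k
instance (arr : List Int) (k : Int) : Decidable (Pre_neg_int arr k) := by unfold Pre_neg_int; infer_instance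
def pvWitness_neg_int : List Int × Int := ([3, -1, -7, 2, -2, 0], 3)

def Spec_neg_int (arr : List Int) (k : Int) (out : List Int) : Prop := out = neg_int_alt arr k
instance (arr : List Int) (k : Int) (out : List Int) : Decidable (Spec_neg_int arr k out) := by unfold Spec_neg_int; infer_instance

-- ===== CLAIM (what is proved, stated in full; the proofs are below) =====
def Claim_equal_neg_int : Prop := ∀ (arr : List Int) (k : Int), Dom_neg_int arr k → Pre_neg_int arr k → Spec_neg_int arr k (neg_int arr k)

-- ===== LEMMAS AND PROOFS =====

-- v arr i = arr[i] as the ports read it (getD with default 0; every index used is in range)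
def pvV (arr : List Int) (i : Nat) : Int := arr.getD i 0

-- the deque invariant predicate: after processing s elements, index i is in the deque
-- iff it is in the (future) window, negative, and dominates every later processed negative
def pvPb (arr : List Int) (K s i : Nat) : Bool :=
  decide (s ≤ i + K) && decide (pvV arr i < 0) &&
    decide (∀ i' < s, i < i' → pvV arr i' < 0 → pvV arr i' < pvV arr i)

def pvDq (arr : List Int) (K s : Nat) : List Int :=
  ((List.range s).filter (pvPb arr K s)).map (fun i : Nat => (i : Int))

def pvWin (arr : List Int) (K w : Nat) : List Int :=
  (List.take K (List.drop w arr)).filter (fun x => decide (x < 0))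

def pvAns (arr : List Int) (K w : Nat) : Int :=
  if 0 < (pvWin arr K w).length then (PySem.List.max? (pvWin arr K w) (fun x => x)).getD 0 else 0

def pvRes (arr : List Int) (K s : Nat) : List Int :=
  ((List.range s).filter (fun j => decide (K ≤ j + 1))).map (fun j => pvAns arr K (j + 1 - K))

-- a while-pop from one end of a monotone list is a filter
theorem pv_dropWhile_eq_filter {α : Type} (p : α → Bool) (l : List α)
    (h : l.Pairwise (fun a b => p a = true → p b = true)) :
    l.dropWhile (fun a => !p a) = l.filter p := by
  induction l with
  | nil => rfl
  | cons a t ih =>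
    rcases List.pairwise_cons.mp h with ⟨ha, ht⟩
    by_cases hp : p a = true
    · simp [List.dropWhile_cons, hp,
        List.filter_eq_self.mpr (fun b hb => ha b hb hp)]
    · simp [List.dropWhile_cons, hp, ih ht]

theorem pv_dropWhile_eq_filter' {α : Type} (p q : α → Bool) (l : List α)
    (hq : ∀ a, q a = !p a)
    (h : l.Pairwise (fun a b => p a = true → p b = true)) :
    l.dropWhile q = l.filter p := by
  rw [show q = fun a => !p a from funext hq]
  exact pv_dropWhile_eq_filter p l h

-- indices in the deque are strictly increasing
theorem pvDq_nat_pairwise (arr : List Int) (K s : Nat) :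
    ((List.range s).filter (pvPb arr K s)).Pairwise (· < ·) :=
  (List.pairwise_lt_range).filter _

-- values along the deque are strictly decreasing
theorem pvDq_val_pairwise (arr : List Int) (K s : Nat) :
    ((List.range s).filter (pvPb arr K s)).Pairwise
      (fun a b => pvV arr b < pvV arr a) := by
  have h := List.pairwise_lt_range (n := s) |>.filter (pvPb arr K s)
  refine List.Pairwise.imp_of_mem ?_ h
  intro a b ha hb hab
  rcases List.mem_filter.mp ha with ⟨har, hpa⟩
  rcases List.mem_filter.mp hb with ⟨hbr, hpb⟩
  simp only [pvPb, Bool.and_eq_true, decide_eq_true_eq] at hpa hpb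
  exact hpa.2 b (List.mem_range.mp hbr) hab hpb.1.2

-- the predicate one step later, at an old index
theorem pvPb_succ (arr : List Int) (K s i : Nat) (hi : i < s) :
    pvPb arr K (s+1) i =
      (pvPb arr K s i && decide (s + 1 ≤ i + K) &&
        (!decide (pvV arr s < 0) || decide (pvV arr s < pvV arr i))) := by
  rw [Bool.eq_iff_iff]
  simp only [pvPb, Bool.and_eq_true, Bool.or_eq_true, Bool.not_eq_true', decide_eq_true_eq,
    decide_eq_false_iff_not]
  constructor
  · rintro ⟨⟨hw, hn⟩, hd⟩
    refine ⟨⟨⟨⟨by omega, hn⟩, fun i' hi' ha hb => hd i' (by omega) ha hb⟩, hw⟩, ?_⟩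
    by_cases hs : pvV arr s < 0
    · exact Or.inr (hd s (by omega) hi hs)
    · exact Or.inl hs
  · rintro ⟨⟨⟨⟨_, hn⟩, hd⟩, hw⟩, hs⟩
    refine ⟨⟨hw, hn⟩, fun i' hi' ha hb => ?_⟩
    rcases Nat.lt_succ_iff_lt_or_eq.mp hi' with h | h
    · exact hd i' h ha hb
    · subst h; rcases hs with hs | hs
      · exact absurd hb hs
      · exact hs

-- the predicate at the newly processed index
theorem pvPb_succ_self (arr : List Int) (K s : Nat) (hK : 1 ≤ K) :
    pvPb arr K (s+1) s = decide (pvV arr s < 0) := by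
  rw [Bool.eq_iff_iff]
  simp only [pvPb, Bool.and_eq_true, decide_eq_true_eq]
  constructor
  · rintro ⟨⟨_, hn⟩, _⟩; exact hn
  · intro hn; exact ⟨⟨by omega, hn⟩, fun i' hi' ha hb => by omega⟩

-- the step function of the port of B (the lambda in neg_int_alt, named for the proofs)
def pvStep (arr : List Int) (k : Int) : (List Int × List Int) → (Int × Int) → (List Int × List Int) :=
  fun st jx =>
    let dq0 := st.1
    let j := jx.1
    let x := jx.2
    let dq1 := if x < 0 then
        (dq0.reverse.dropWhile (fun i => PySem.List.pyGetD arr i 0 ≤ x)).reverse ++ [j]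
      else dq0
    if j ≥ k - 1 then
      let dq2 := dq1.dropWhile (fun i => i ≤ j - k)
      (dq2, st.2 ++ [match dq2 with
                     | [] => 0
                     | i :: _ => PySem.List.pyGetD arr i 0])
    else (dq1, st.2)

theorem pv_alt_eq (arr : List Int) (k : Int) :
    neg_int_alt arr k = ((PySem.List.enumerate arr 0).foldl (pvStep arr k) ([], [])).2 := rfl

-- the new filter after one step, at the Nat level
theorem pv_filter_succ (arr : List Int) (K s : Nat) (hK : 1 ≤ K) :
    (List.range (s+1)).filter (pvPb arr K (s+1)) =
      ((List.range s).filter (fun i => pvPb arr K s i && decide (s + 1 ≤ i + K) &&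
          (!decide (pvV arr s < 0) || decide (pvV arr s < pvV arr i))))
        ++ (if pvV arr s < 0 then [s] else []) := by
  rw [List.range_succ, List.filter_append]
  congr 1
  · exact List.filter_congr (fun i hi => pvPb_succ arr K s i (List.mem_range.mp hi))
  · rw [List.filter_singleton, pvPb_succ_self arr K s hK]
    by_cases hx : pvV arr s < 0 <;> simp [hx]

-- the back-pop of Source B computed as a filter
theorem pv_backpop (arr : List Int) (K s : Nat) :
    ((pvDq arr K s).reverse.dropWhile (fun i => PySem.List.pyGetD arr i 0 ≤ pvV arr s)).reverse
      = ((List.range s).filter (fun i => pvPb arr K s i && decide (pvV arr s < pvV arr i))).map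
          (fun i : Nat => (i : Int)) := by
  have hrev : (pvDq arr K s).reverse
      = (((List.range s).filter (pvPb arr K s)).reverse).map (fun i : Nat => (i : Int)) := by
    unfold pvDq
    exact (List.map_reverse).symm
  rw [hrev, List.dropWhile_map]
  have hpair : (((List.range s).filter (pvPb arr K s)).reverse).Pairwise
      (fun a b => decide (pvV arr s < pvV arr a) = true → decide (pvV arr s < pvV arr b) = true) := by
    rw [List.pairwise_reverse]
    refine (pvDq_val_pairwise arr K s).imp ?_
    intro a b hab
    simp only [decide_eq_true_eq]
    omega
  rw [pv_dropWhile_eq_filter' (fun i : Nat => decide (pvV arr s < pvV arr i)) _ _ ?_ hpair,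
    List.filter_reverse, List.map_reverse, List.reverse_reverse, List.filter_filter]
  · exact congrArg _ (List.filter_congr (fun i _ => Bool.and_comm _ _))
  · intro i
    simp only [Function.comp_apply, PySem.List.pyGetD_natCast, ← decide_not, decide_eq_decide, pvV]
    omega

-- the front-trim of Source B computed as a filter (on any strictly increasing Nat list)
theorem pv_trim (K s : Nat) (l : List Nat) (hl : l.Pairwise (· < ·)) :
    (l.map (fun i : Nat => (i : Int))).dropWhile (fun i => i ≤ (s : Int) - (K : Int))
      = (l.filter (fun i => decide (s + 1 ≤ i + K))).map (fun i : Nat => (i : Int)) := by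
  rw [List.dropWhile_map]
  rw [pv_dropWhile_eq_filter' (fun i : Nat => decide (s + 1 ≤ i + K)) _ _ ?_ ?_]
  · intro i
    simp only [Function.comp_apply, ← decide_not, decide_eq_decide]
    omega
  · refine hl.imp ?_
    intro a b hab
    simp only [decide_eq_true_eq]
    omega

-- membership in a window's list of negatives, by index
theorem pv_mem_win (arr : List Int) (K w s : Nat) (hws : w + K = s + 1) (hsn : s < arr.length)
    (y : Int) :
    y ∈ pvWin arr K w ↔ (∃ i, w ≤ i ∧ i ≤ s ∧ pvV arr i = y) ∧ y < 0 := by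
  unfold pvWin
  rw [List.mem_filter]
  constructor
  · rintro ⟨hy, hneg⟩
    rcases List.mem_iff_getElem.mp hy with ⟨t, ht, rfl⟩
    have ht' : t < K ∧ w + t < arr.length := by
      simp only [List.length_take, List.length_drop] at ht
      omega
    refine ⟨⟨w + t, by omega, by omega, ?_⟩, by simpa using hneg⟩
    rw [List.getElem_take, List.getElem_drop, pvV, List.getD_eq_getElem arr 0 (by omega)]
  · rintro ⟨⟨i, hwi, his, rfl⟩, hneg⟩
    have hin : i < arr.length := by omega
    refine ⟨List.mem_iff_getElem.mpr ⟨i - w, ?_, ?_⟩, by simpa using hneg⟩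
    · simp only [List.length_take, List.length_drop]
      omega
    · rw [List.getElem_take, List.getElem_drop, pvV, List.getD_eq_getElem arr 0 hin]
      congr 1
      omega

-- the last index achieving the window maximum satisfies the deque predicate
theorem pv_exists_dom (arr : List Int) (K w s : Nat) (hws : w + K = s + 1) (hsn : s < arr.length)
    (m : Int) (hmax : PySem.List.max? (pvWin arr K w) (fun x => x) = some m) :
    ∃ i, i ≤ s ∧ pvV arr i = m ∧ pvPb arr K (s+1) i = true := by
  have hm : m ∈ pvWin arr K w := PySem.List.max?_mem hmax
  rcases (pv_mem_win arr K w s hws hsn m).mp hm with ⟨⟨im, hwim, hims, hvim⟩, hmneg⟩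
  set Q : Nat → Prop := fun i => w ≤ i ∧ pvV arr i = m with hQ
  have hQim : Q im := ⟨hwim, hvim⟩
  set i0 := Nat.findGreatest Q s with hi0
  have hQi0 : Q i0 := Nat.findGreatest_spec hims hQim
  have hi0s : i0 ≤ s := Nat.findGreatest_le s
  refine ⟨i0, hi0s, hQi0.2, ?_⟩
  simp only [pvPb, Bool.and_eq_true, decide_eq_true_eq]
  refine ⟨⟨by omega, by rw [hQi0.2]; exact hmneg⟩, ?_⟩
  intro i' hi' hlt hneg
  have hmem : pvV arr i' ∈ pvWin arr K w :=
    (pv_mem_win arr K w s hws hsn (pvV arr i')).mpr ⟨⟨i', by omega, by omega, rfl⟩, hneg⟩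
  have hle : pvV arr i' ≤ m := PySem.List.max?_isMax hmax (pvV arr i') hmem
  rcases lt_or_eq_of_le hle with h | h
  · rw [hQi0.2]; exact h
  · exact absurd ⟨by omega, h⟩ (Nat.findGreatest_is_greatest hlt (by omega))

-- the deque front after step s is the window answer for the window ending at s
theorem pv_head (arr : List Int) (K s : Nat) (_hK : 1 ≤ K) (hKs : K ≤ s + 1)
    (hsn : s < arr.length) :
    (match (List.range (s+1)).filter (pvPb arr K (s+1)) with
     | [] => (0:Int)
     | i :: _ => pvV arr i) = pvAns arr K (s + 1 - K) := by
  set w := s + 1 - K with hw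
  have hws : w + K = s + 1 := by omega
  cases hfil : (List.range (s+1)).filter (pvPb arr K (s+1)) with
  | nil =>
    have hempty : pvWin arr K w = [] := by
      by_contra hne
      cases hmax : PySem.List.max? (pvWin arr K w) (fun x => x) with
      | none => exact hne ((PySem.List.max?_eq_none_iff _ _).mp hmax)
      | some m =>
        rcases pv_exists_dom arr K w s hws hsn m hmax with ⟨i0, hi0s, _, hpb⟩
        have : i0 ∈ (List.range (s+1)).filter (pvPb arr K (s+1)) :=
          List.mem_filter.mpr ⟨List.mem_range.mpr (by omega), hpb⟩
        rw [hfil] at this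
        exact absurd this (List.not_mem_nil)
    simp [pvAns, hempty]
  | cons i0 r =>
    have hi0 : i0 ∈ (List.range (s+1)).filter (pvPb arr K (s+1)) := by
      rw [hfil]; exact List.mem_cons_self
    rcases List.mem_filter.mp hi0 with ⟨hi0r, hpb0⟩
    have hi0s : i0 ≤ s := by have := List.mem_range.mp hi0r; omega
    simp only [pvPb, Bool.and_eq_true, decide_eq_true_eq] at hpb0
    have hwin : w ≤ i0 := by omega
    have hmem0 : pvV arr i0 ∈ pvWin arr K w :=
      (pv_mem_win arr K w s hws hsn (pvV arr i0)).mpr ⟨⟨i0, hwin, hi0s, rfl⟩, hpb0.1.2⟩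
    have hne : pvWin arr K w ≠ [] := fun h => by simp [h] at hmem0
    cases hmax : PySem.List.max? (pvWin arr K w) (fun x => x) with
    | none => exact absurd ((PySem.List.max?_eq_none_iff _ _).mp hmax) hne
    | some m =>
      have hle : pvV arr i0 ≤ m := PySem.List.max?_isMax hmax (pvV arr i0) hmem0
      rcases pv_exists_dom arr K w s hws hsn m hmax with ⟨istar, hstars, hvstar, hpbstar⟩
      have hstarmem : istar ∈ (List.range (s+1)).filter (pvPb arr K (s+1)) :=
        List.mem_filter.mpr ⟨List.mem_range.mpr (by omega), hpbstar⟩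
      have heq : pvV arr i0 = m := by
        rw [hfil] at hstarmem
        rcases List.mem_cons.mp hstarmem with h | h
        · rw [← h, hvstar]
        · -- istar strictly after i0 in the deque: i0 dominates it, contradiction with maximality
          have hpw : ((List.range (s+1)).filter (pvPb arr K (s+1))).Pairwise (· < ·) :=
            pvDq_nat_pairwise arr K (s+1)
          rw [hfil, List.pairwise_cons] at hpw
          have hlt : i0 < istar := hpw.1 istar h
          have hneg : pvV arr istar < 0 := by
            rw [hvstar]
            rcases (pv_mem_win arr K w s hws hsn m).mp (PySem.List.max?_mem hmax) with ⟨_, hm⟩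
            exact hm
          have := hpb0.2 istar (by omega) hlt hneg
          rw [hvstar] at this
          omega
      have hlen : 0 < (pvWin arr K w).length := by
        cases hwin : pvWin arr K w with
        | nil => exact absurd hwin hne
        | cons a t => simp
      simp [pvAns, hlen, hmax, heq]

theorem pvRes_succ (arr : List Int) (K s : Nat) :
    pvRes arr K (s+1) = pvRes arr K s ++ (if K ≤ s + 1 then [pvAns arr K (s + 1 - K)] else []) := by
  unfold pvRes
  rw [List.range_succ, List.filter_append, List.map_append]
  congr 1
  by_cases h : K ≤ s + 1 <;> simp [h]

-- one step of the fold of B maintains the deque and result invariants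
theorem pv_step (arr : List Int) (K : Nat) (hK : 1 ≤ K) (s : Nat) (hsn : s < arr.length)
    (res : List Int) :
    pvStep arr (K : Int) (pvDq arr K s, res) ((s : Int), pvV arr s)
      = (pvDq arr K (s+1), res ++ if K ≤ s + 1 then [pvAns arr K (s + 1 - K)] else []) := by
  have hmatch : ∀ (l : List Nat),
      (match l.map (fun i : Nat => (i : Int)) with
       | [] => (0:Int)
       | i :: _ => PySem.List.pyGetD arr i 0)
      = (match l with | [] => (0:Int) | i :: _ => pvV arr i) := by
    intro l
    cases l with
    | nil => rfl
    | cons a t => simp [PySem.List.pyGetD_natCast, pvV]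
  have hpairq : ∀ (q : Nat → Bool), (((List.range s).filter q) ++ [s]).Pairwise (· < ·) := by
    intro q
    rw [List.pairwise_append]
    refine ⟨(List.pairwise_lt_range).filter q, List.pairwise_singleton _ _, ?_⟩
    intro a ha b hb
    rcases List.mem_filter.mp ha with ⟨har, _⟩
    have := List.mem_range.mp har
    simp only [List.mem_singleton] at hb
    omega
  by_cases hx : pvV arr s < 0 <;> by_cases hKs : K ≤ s + 1
  · -- negative element, full window
    simp only [pvStep, if_pos hx, if_pos (show (s:Int) ≥ (K:Int) - 1 by omega)]
    rw [pv_backpop arr K s,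
      show ((List.range s).filter (fun i => pvPb arr K s i && decide (pvV arr s < pvV arr i))).map
            (fun i : Nat => (i : Int)) ++ [(s : Int)]
        = (((List.range s).filter (fun i => pvPb arr K s i && decide (pvV arr s < pvV arr i)))
            ++ [s]).map (fun i : Nat => (i : Int)) by simp,
      pv_trim K s _ (hpairq _)]
    have hlist : (((List.range s).filter
          (fun i => pvPb arr K s i && decide (pvV arr s < pvV arr i)))
            ++ [s]).filter (fun i => decide (s + 1 ≤ i + K))
        = (List.range (s+1)).filter (pvPb arr K (s+1)) := by
      rw [pv_filter_succ arr K s hK, if_pos hx, List.filter_append, List.filter_filter]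
      congr 1
      · refine List.filter_congr ?_
        intro i _
        rw [Bool.eq_iff_iff]
        simp only [Bool.and_eq_true, Bool.or_eq_true, Bool.not_eq_true', decide_eq_true_eq,
          decide_eq_false_iff_not]
        constructor
        · rintro ⟨hw, hp, hv⟩; exact ⟨⟨hp, hw⟩, Or.inr hv⟩
        · rintro ⟨⟨hp, hw⟩, hv⟩
          rcases hv with hv | hv
          · exact absurd hx hv
          · exact ⟨hw, hp, hv⟩
      · simp
        all_goals omega
    rw [hlist, hmatch, pv_head arr K s hK hKs hsn, if_pos hKs]
    rfl
  · -- negative element, window not yet full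
    simp only [pvStep, if_pos hx, if_neg (show ¬((s:Int) ≥ (K:Int) - 1) by omega)]
    rw [pv_backpop arr K s, if_neg hKs]
    have hlist : ((List.range s).filter
          (fun i => pvPb arr K s i && decide (pvV arr s < pvV arr i)))
            ++ [s] = (List.range (s+1)).filter (pvPb arr K (s+1)) := by
      rw [pv_filter_succ arr K s hK, if_pos hx]
      congr 1
      refine List.filter_congr ?_
      intro i hi
      have hwin : s + 1 ≤ i + K := by omega
      rw [Bool.eq_iff_iff]
      simp only [Bool.and_eq_true, Bool.or_eq_true, Bool.not_eq_true', decide_eq_true_eq,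
        decide_eq_false_iff_not]
      constructor
      · rintro ⟨hp, hv⟩; exact ⟨⟨hp, hwin⟩, Or.inr hv⟩
      · rintro ⟨⟨hp, _⟩, hv⟩
        rcases hv with hv | hv
        · exact absurd hx hv
        · exact ⟨hp, hv⟩
    simp only [List.append_nil]
    unfold pvDq
    rw [← hlist]
    simp
  · -- non-negative element, full window
    simp only [pvStep, if_neg hx, if_pos (show (s:Int) ≥ (K:Int) - 1 by omega)]
    unfold pvDq
    rw [pv_trim K s _ ((List.pairwise_lt_range).filter _), List.filter_filter]
    have hlist : (List.range s).filter
          (fun i => decide (s + 1 ≤ i + K) && pvPb arr K s i)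
        = (List.range (s+1)).filter (pvPb arr K (s+1)) := by
      rw [pv_filter_succ arr K s hK, if_neg hx, List.append_nil]
      refine List.filter_congr ?_
      intro i _
      rw [Bool.eq_iff_iff]
      simp only [Bool.and_eq_true, Bool.or_eq_true, Bool.not_eq_true', decide_eq_true_eq,
        decide_eq_false_iff_not]
      constructor
      · rintro ⟨hw, hp⟩; exact ⟨⟨hp, hw⟩, Or.inl hx⟩
      · rintro ⟨⟨hp, hw⟩, _⟩; exact ⟨hw, hp⟩
    rw [hlist, hmatch, pv_head arr K s hK hKs hsn, if_pos hKs]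
  · -- non-negative element, window not yet full
    simp only [pvStep, if_neg hx, if_neg (show ¬((s:Int) ≥ (K:Int) - 1) by omega)]
    rw [if_neg hKs, List.append_nil]
    have hlist : (List.range s).filter (pvPb arr K s)
        = (List.range (s+1)).filter (pvPb arr K (s+1)) := by
      rw [pv_filter_succ arr K s hK, if_neg hx, List.append_nil]
      refine List.filter_congr ?_
      intro i hi
      have hwin : s + 1 ≤ i + K := by omega
      rw [Bool.eq_iff_iff]
      simp only [Bool.and_eq_true, Bool.or_eq_true, Bool.not_eq_true', decide_eq_true_eq,
        decide_eq_false_iff_not]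
      constructor
      · intro hp; exact ⟨⟨hp, hwin⟩, Or.inl hx⟩
      · rintro ⟨⟨hp, _⟩, _⟩; exact hp
    unfold pvDq
    rw [hlist]

-- the whole fold of B, by induction on the unprocessed suffix
theorem pv_fold (arr : List Int) (K : Nat) (hK : 1 ≤ K) :
    ∀ (t : List Int) (s : Nat), s ≤ arr.length → arr.drop s = t →
      (PySem.List.enumerate t (s : Int)).foldl (pvStep arr (K : Int))
          (pvDq arr K s, pvRes arr K s)
        = (pvDq arr K arr.length, pvRes arr K arr.length) := by
  intro t
  induction t with
  | nil =>
    intro s hsle hdrop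
    have hs : arr.length ≤ s := by
      have := congrArg List.length hdrop
      simp only [List.length_drop, List.length_nil] at this
      omega
    have hseq : s = arr.length := by omega
    rw [PySem.List.enumerate_nil, List.foldl_nil, hseq]
  | cons x t ih =>
    intro s hsle hdrop
    have hsn : s < arr.length := by
      have := congrArg List.length hdrop
      simp only [List.length_drop, List.length_cons] at this
      omega
    have hx : pvV arr s = x := by
      have h0 : (arr.drop s)[0]'(by rw [hdrop]; simp) = x := by
        simp [hdrop]
      rw [List.getElem_drop] at h0
      simp only [Nat.add_zero] at h0
      rw [pvV, List.getD_eq_getElem arr 0 hsn, h0]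
    have hdrop' : arr.drop (s+1) = t := by
      have : arr.drop (s+1) = (arr.drop s).drop 1 := by
        rw [List.drop_drop]
      rw [this, hdrop, List.drop_one, List.tail_cons]
    rw [PySem.List.enumerate_cons, List.foldl_cons, ← hx,
      pv_step arr K hK s hsn (pvRes arr K s), ← pvRes_succ arr K s,
      show (s : Int) + 1 = ((s + 1 : Nat) : Int) by push_cast; ring]
    exact ih (s + 1) (by omega) hdrop'

-- B's port computes pvRes
theorem pv_alt (arr : List Int) (k : Int) (K : Nat) (hk : k = (K : Int)) (hK : 1 ≤ K) :
    neg_int_alt arr k = pvRes arr K arr.length := by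
  rw [pv_alt_eq, hk]
  have h0 : (PySem.List.enumerate arr ((0 : Nat) : Int)).foldl (pvStep arr (K : Int))
      (pvDq arr K 0, pvRes arr K 0) = (pvDq arr K arr.length, pvRes arr K arr.length) :=
    pv_fold arr K hK arr 0 (by omega) (by simp)
  have hdq0 : pvDq arr K 0 = [] := by simp [pvDq]
  have hres0 : pvRes arr K 0 = [] := by simp [pvRes]
  rw [hdq0, hres0] at h0
  norm_num at h0
  rw [h0]

-- A's port computes the window answers directly
theorem pv_a (arr : List Int) (k : Int) (K : Nat) (hk : k = (K : Int)) (hK : 1 ≤ K) :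
    neg_int arr k = (List.range (((arr.length : Int) - k + 1).toNat)).map (pvAns arr K) := by
  unfold neg_int
  rw [PySem.List.pyRange_one, List.foldl_map, PySem.List.foldl_append_singleton_eq_map,
    List.nil_append, show ((arr.length : Int) - k + 1 - 0) = ((arr.length : Int) - k + 1) by ring]
  refine List.map_congr_left ?_
  intro w hw
  have hw' : (w : Int) ≥ 0 := by omega
  rw [zero_add, PySem.List.slice_toNat arr (by omega) (by omega)]
  have h1 : ((w : Int) + k).toNat - ((w : Int)).toNat = K := by omega
  have h2 : ((w : Int)).toNat = w := by omega
  rw [h1, h2]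
  unfold pvAns pvWin
  rfl

-- reindexing: the results of B listed by step index are A's results listed by window start
theorem pv_reindex (arr : List Int) (K : Nat) (hK : 1 ≤ K) :
    pvRes arr K arr.length
      = (List.range (((arr.length : Int) - (K : Int) + 1).toNat)).map (pvAns arr K) := by
  set n := arr.length with hn
  by_cases hc : K ≤ n
  · have hW : ((n : Int) - (K : Int) + 1).toNat = n + 1 - K := by omega
    have hsplit : n = (K - 1) + (n + 1 - K) := by omega
    rw [hW]
    unfold pvRes
    rw [show List.range n = List.range ((K - 1) + (n + 1 - K)) by rw [← hsplit],
      List.range_add, List.filter_append]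
    have hfirst : (List.range (K - 1)).filter (fun j => decide (K ≤ j + 1)) = [] := by
      rw [List.filter_eq_nil_iff]
      intro a ha
      have := List.mem_range.mp ha
      simp only [decide_eq_true_eq]
      omega
    have hsecond : ((List.range (n + 1 - K)).map (fun t => (K - 1) + t)).filter
        (fun j => decide (K ≤ j + 1)) = (List.range (n + 1 - K)).map (fun t => (K - 1) + t) := by
      rw [List.filter_eq_self]
      intro a ha
      rcases List.mem_map.mp ha with ⟨t, _, rfl⟩
      simp only [decide_eq_true_eq]
      omega
    rw [hfirst, hsecond, List.nil_append, List.map_map]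
    refine List.map_congr_left ?_
    intro t _
    simp only [Function.comp_apply]
    congr 1
    omega
  · have hW : ((n : Int) - (K : Int) + 1).toNat = 0 := by omega
    rw [hW]
    unfold pvRes
    rw [List.filter_eq_nil_iff.mpr ?_]
    · rfl
    · intro a ha
      have := List.mem_range.mp ha
      simp only [decide_eq_true_eq]
      omega

-- ===== VERDICT (by name: the statement is the Claim_ definition above) =====
theorem neg_int_spec : Claim_equal_neg_int := by
  unfold Claim_equal_neg_int
  intro arr k _ hpre
  unfold Pre_neg_int at hpre
  unfold Spec_neg_int
  have hk : k = (k.toNat : Int) := by omega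
  have hK : 1 ≤ k.toNat := by omega
  rw [pv_a arr k k.toNat hk hK, pv_alt arr k k.toNat hk hK, pv_reindex arr k.toNat hK, hk]
  simp
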